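-- pv_equiv track=rewrite | github.com/YuanyueLi/alphapept | alphapept/fasta.py | add_variable_mods
-- ===== SOURCE A (Python) =====
-- from itertools import product
-- from itertools import chain
--
-- def get_mod_pos(variable_mods_r, sequence):
--     """
--     Returns a list with of tuples with all possibilities for modified an unmodified AAs.
--     """
--     modvar = []
--     for c in sequence:
--         if c in variable_mods_r.keys():
--             modvar.append((c, variable_mods_r[c]))
--         else:
--             modvar.append((c,))
--
--     return modvar
--
-- def get_isoforms(variable_mods_r, sequence, max_isoforms):
--     """
--     Function to generate isoforms for a given peptide - returns a list of isoforms.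
--     The original sequence is included in the list
--     """
--     modvar = get_mod_pos(variable_mods_r, sequence)
--     isoforms = []
--     i = 0
--     for o in product(*modvar):
--         if i < max_isoforms:
--             i += 1
--             isoforms.append("".join(o))
--
--         else:
--             break
--
--     return isoforms
--
-- def add_variable_mods(peptide_list, mods_variable, max_isoforms, **kwargs):
--     if not mods_variable:
--         return peptide_list
--     else:
--         mods_variable_r = {}
--         for _ in mods_variable:
--             mods_variable_r[_[-1]] = _
--
--         peptide_list = [get_isoforms(mods_variable_r, peptide, max_isoforms) for peptide in peptide_list]
--         return list(chain.from_iterable(peptide_list))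
-- ===== SOURCE B (Python) =====
-- def add_variable_mods(peptide_list, mods_variable, max_isoforms, **kwargs):
--     if not mods_variable:
--         return peptide_list
--     mods = {m[-1]: m for m in mods_variable}
--     cap = max_isoforms if max_isoforms > 0 else 0
--     out = []
--     for peptide in peptide_list:
--         iso = [""][:cap]
--         for c in peptide:
--             nxt = []
--             for p in iso:
--                 nxt.append(p + c)
--                 if c in mods:
--                     nxt.append(p + mods[c])
--             iso = nxt[:cap]
--         out.extend(iso)
--     return out
-- ===== Notes on version B (the rewrite author's own statement) =====
-- stated objective: alternative
-- what changed: Replaces the per-peptide itertools.product over all modification choices (materialised lazily and cut off by a counter) with an incremental left-to-right fold that extends every kept prefix by the plain residue and, if modifiable, its modification, truncating to the cap after each residue; the outer comprehension-plus-chain is a single accumulating loop.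
import Mathlib
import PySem

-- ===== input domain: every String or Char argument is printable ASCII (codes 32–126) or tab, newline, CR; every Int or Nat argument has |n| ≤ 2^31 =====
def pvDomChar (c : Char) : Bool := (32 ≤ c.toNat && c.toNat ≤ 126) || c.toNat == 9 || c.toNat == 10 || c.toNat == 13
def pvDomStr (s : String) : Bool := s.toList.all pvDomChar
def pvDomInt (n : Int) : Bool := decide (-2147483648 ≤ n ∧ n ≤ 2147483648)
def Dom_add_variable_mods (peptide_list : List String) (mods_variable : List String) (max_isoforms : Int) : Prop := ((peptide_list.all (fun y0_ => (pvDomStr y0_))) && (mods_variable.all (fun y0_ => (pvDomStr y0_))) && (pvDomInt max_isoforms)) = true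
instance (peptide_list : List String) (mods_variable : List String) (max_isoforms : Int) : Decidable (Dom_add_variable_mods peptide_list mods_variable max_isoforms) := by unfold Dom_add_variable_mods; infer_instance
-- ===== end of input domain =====

-- B replaces itertools.product + counted cut-off by an incremental prefix-extension fold with
-- truncation after each residue (alternative decomposition, same cost).

-- ===== PORT A =====
-- mods_variable_r[_[-1]] = _  (the .getD ' ' default is unreachable under Pre_: no empty mod string)
def pvDictA (mods_variable : List String) : PySem.Dict Char String :=
  mods_variable.foldl (fun d m => d.insert ((PySem.Str.pyGet? m (-1)).getD ' ') m) PySem.Dict.empty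

-- one position of get_mod_pos: (c,) or (c, variable_mods_r[c]) as a list of strings
def pvOptsA (d : PySem.Dict Char String) (c : Char) : List String :=
  if d.contains c then [String.ofList [c], d.getD c ""] else [String.ofList [c]]

def pvGetModPos (d : PySem.Dict Char String) (sequence : List Char) : List (List String) :=
  sequence.foldl (fun modvar c => modvar ++ [pvOptsA d c]) []

-- itertools.product(*modvar), in product order (last factor varies fastest)
def pvProd : List (List String) → List (List String)
  | [] => [[]]
  | o :: rest => o.flatMap (fun s => (pvProd rest).map (fun t => s :: t))

-- the 'for o in product: if i < max_isoforms: …: else break' loop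
def pvIsoLoop : List (List String) → Int → Int → List String
  | [], _, _ => []
  | o :: rest, i, mx => if i < mx then PySem.Str.join "" o :: pvIsoLoop rest (i + 1) mx else []

def pvGetIsoforms (d : PySem.Dict Char String) (sequence : List Char) (max_isoforms : Int) : List String :=
  pvIsoLoop (pvProd (pvGetModPos d sequence)) 0 max_isoforms

def add_variable_mods (peptide_list : List String) (mods_variable : List String) (max_isoforms : Int) : List String :=
  if mods_variable = [] then peptide_list
  else
    let d := pvDictA mods_variable
    (peptide_list.map (fun p => pvGetIsoforms d p.toList max_isoforms)).flatten

-- ===== PORT B =====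
-- {m[-1]: m for m in mods_variable}  (the .getD ' ' default is unreachable under Pre_)
def pvDictB (mods_variable : List String) : PySem.Dict Char String :=
  mods_variable.foldl (fun d m => d.insert ((PySem.Str.pyGet? m (-1)).getD ' ') m) PySem.Dict.empty

def add_variable_mods_alt (peptide_list : List String) (mods_variable : List String) (max_isoforms : Int) : List String :=
  if mods_variable = [] then peptide_list
  else
    let d := pvDictB mods_variable
    let cap : Int := if 0 < max_isoforms then max_isoforms else 0
    peptide_list.foldl (fun out p =>
      out ++ p.toList.foldl (fun iso c =>
          PySem.List.slice
            (iso.flatMap (fun q =>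
              if d.contains c then [q ++ String.ofList [c], q ++ d.getD c ""]
              else [q ++ String.ofList [c]]))
            none (some cap))
        (PySem.List.slice [""] none (some cap))) []

-- ===== PRECONDITION & SPEC =====
-- Pre_ excludes exactly the inputs on which A raises IndexError: an empty string among mods_variable ( _[-1] ).
def Pre_add_variable_mods (peptide_list : List String) (mods_variable : List String) (max_isoforms : Int) : Prop :=
  "" ∉ mods_variable
instance (peptide_list : List String) (mods_variable : List String) (max_isoforms : Int) : Decidable (Pre_add_variable_mods peptide_list mods_variable max_isoforms) := by unfold Pre_add_variable_mods; infer_instance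

def pvWitness_add_variable_mods : List String × List String × Int := (["AM", "CA"], ["oxM"], 3)

def Spec_add_variable_mods (peptide_list : List String) (mods_variable : List String) (max_isoforms : Int) (out : List String) : Prop := out = add_variable_mods_alt peptide_list mods_variable max_isoforms
instance (peptide_list : List String) (mods_variable : List String) (max_isoforms : Int) (out : List String) : Decidable (Spec_add_variable_mods peptide_list mods_variable max_isoforms out) := by unfold Spec_add_variable_mods; infer_instance

-- ===== CLAIM (what is proved, stated in full; the proofs are below) =====
def Claim_equal_add_variable_mods : Prop := ∀ (peptide_list : List String) (mods_variable : List String) (max_isoforms : Int), Dom_add_variable_mods peptide_list mods_variable max_isoforms → Pre_add_variable_mods peptide_list mods_variable max_isoforms → Spec_add_variable_mods peptide_list mods_variable max_isoforms (add_variable_mods peptide_list mods_variable max_isoforms)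

-- ===== LEMMAS AND PROOFS =====

-- "".join over List Char lists is flatten
theorem pvJoin_nil_flatten (l : List (List Char)) : PySem.Chars.join [] l = l.flatten := by
  induction l with
  | nil => simp [PySem.Chars.join_nil]
  | cons a t ih =>
    cases t with
    | nil => simp [PySem.Chars.join_singleton]
    | cons b r => rw [PySem.Chars.join_cons_cons, ih]; simp

-- snoc law for Python's "".join on strings
theorem pvJoin_snoc (t : List String) (s : String) :
    PySem.Str.join "" (t ++ [s]) = PySem.Str.join "" t ++ s := by
  apply String.toList_inj.mp
  simp [PySem.Str.toList_join, pvJoin_nil_flatten]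

-- product snoc law
theorem pvProd_snoc (L : List (List String)) (o : List String) :
    pvProd (L ++ [o]) = (pvProd L).flatMap (fun t => o.map (fun s => t ++ [s])) := by
  induction L with
  | nil => simp [pvProd, ← List.map_eq_flatMap]
  | cons a t ih => simp [pvProd, ih, List.map_flatMap, List.flatMap_map, List.flatMap_assoc, Function.comp_def]

-- joined product = left fold extending prefixes
theorem pvProd_join_foldl (L : List (List String)) :
    (pvProd L).map (PySem.Str.join "") =
      L.foldl (fun iso o => iso.flatMap (fun q => o.map (fun s => q ++ s))) [""] := by
  induction L using List.reverseRecOn with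
  | nil =>
    have : PySem.Str.join "" ([] : List String) = "" := by
      apply String.toList_inj.mp; simp [PySem.Str.toList_join]
    simp [pvProd, this]
  | append_singleton L o ih =>
    rw [pvProd_snoc, List.foldl_append]
    simp [← ih, List.map_flatMap, List.flatMap_map, pvJoin_snoc, Function.comp_def]

-- truncated flatMap ignores elements past the cap (f never empty)
theorem pvTake_flatMap {α β : Type} (f : α → List β) (hf : ∀ x, f x ≠ []) :
    ∀ (l : List α) (n m : Nat), n ≤ m →
      (((l.take m).flatMap f).take n) = ((l.flatMap f).take n) := by
  intro l
  induction l with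
  | nil => simp
  | cons a t ih =>
    intro n m hnm
    cases n with
    | zero => simp
    | succ s =>
      cases m with
      | zero => omega
      | succ r =>
        have h1 : 1 ≤ (f a).length := List.length_pos_iff.mpr (hf a)
        simp only [List.take_succ_cons, List.flatMap_cons, List.take_append]
        rw [ih (s + 1 - (f a).length) r (by omega)]

-- A's cut-off loop is a take of the mapped list
theorem pvIsoLoop_eq_take (l : List (List String)) :
    ∀ (i mx : Int), pvIsoLoop l i mx = (l.map (PySem.Str.join "")).take (mx - i).toNat := by
  induction l with
  | nil => intro i mx; simp [pvIsoLoop]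
  | cons o rest ih =>
    intro i mx
    by_cases h : i < mx
    · have hs : (mx - i).toNat = (mx - (i + 1)).toNat + 1 := by omega
      simp [pvIsoLoop, h, hs, ih]
    · have hz : (mx - i).toNat = 0 := by omega
      simp [pvIsoLoop, h, hz]

-- B's per-residue option list equals A's pvOptsA, mapped over the prefix
theorem pvStep_eq (d : PySem.Dict Char String) (c : Char) (q : String) :
    (if d.contains c then [q ++ String.ofList [c], q ++ d.getD c ""] else [q ++ String.ofList [c]])
      = (pvOptsA d c).map (fun s => q ++ s) := by
  by_cases h : d.contains c <;> simp [pvOptsA, h]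

theorem pvOptsA_ne_nil (d : PySem.Dict Char String) (c : Char) : pvOptsA d c ≠ [] := by
  by_cases h : d.contains c <;> simp [pvOptsA, h]

-- the capped fold equals the uncapped fold, truncated
theorem pvFold_take (g : Char → List String) (hg : ∀ c, g c ≠ []) (n : Nat) (cs : List Char) :
    cs.foldl (fun iso c => (iso.flatMap (fun q => (g c).map (fun s => q ++ s))).take n) (([""] : List String).take n)
      = (cs.foldl (fun iso c => iso.flatMap (fun q => (g c).map (fun s => q ++ s))) [""]).take n := by
  induction cs using List.reverseRecOn with
  | nil => rfl
  | append_singleton cs c ih =>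
    rw [List.foldl_append, List.foldl_append, ih]
    simp only [List.foldl_cons, List.foldl_nil]
    exact pvTake_flatMap _ (fun q => by simp [hg c]) _ n n le_rfl

-- per-peptide equality: A's capped product enumeration = B's truncating fold
theorem pvPeptide_eq (d : PySem.Dict Char String) (cs : List Char) (mx : Int) :
    pvGetIsoforms d cs mx
      = cs.foldl (fun iso c =>
          PySem.List.slice
            (iso.flatMap (fun q =>
              if d.contains c then [q ++ String.ofList [c], q ++ d.getD c ""]
              else [q ++ String.ofList [c]]))
            none (some (if 0 < mx then mx else 0)))
        (PySem.List.slice [""] none (some (if 0 < mx then mx else 0))) := by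
  have hcap : (0 : Int) ≤ if 0 < mx then mx else 0 := by split <;> omega
  have hn : (if 0 < mx then mx else 0).toNat = mx.toNat := by split <;> omega
  calc pvGetIsoforms d cs mx
      = ((pvProd (pvGetModPos d cs)).map (PySem.Str.join "")).take mx.toNat := by
        rw [pvGetIsoforms, pvIsoLoop_eq_take]; norm_num
    _ = (cs.foldl (fun iso c => iso.flatMap (fun q => (pvOptsA d c).map (fun s => q ++ s))) [""]).take mx.toNat := by
        rw [pvGetModPos, PySem.List.foldl_append_singleton_eq_map, List.nil_append,
          pvProd_join_foldl, List.foldl_map]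
    _ = cs.foldl (fun iso c => (iso.flatMap (fun q => (pvOptsA d c).map (fun s => q ++ s))).take mx.toNat) (([""] : List String).take mx.toNat) := by
        rw [pvFold_take _ (pvOptsA_ne_nil d)]
    _ = _ := by
        simp only [PySem.List.slice_to _ hcap, hn, pvStep_eq]

-- ===== VERDICT (by name: the statement is the Claim_ definition above) =====
theorem add_variable_mods_spec : Claim_equal_add_variable_mods := by
  intro pl mv mx _ _
  unfold Spec_add_variable_mods add_variable_mods add_variable_mods_alt
  by_cases hmv : mv = []
  · simp [hmv]
  · simp only [if_neg hmv]
    rw [PySem.List.foldl_append_eq_flatMap, List.nil_append, List.flatMap_def]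
    have hd : pvDictB mv = pvDictA mv := rfl
    rw [hd]
    refine congrArg List.flatten (List.map_congr_left ?_)
    intro p _
    exact pvPeptide_eq (pvDictA mv) p.toList mx
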